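-- pv_equiv track=rewrite | github.com/FSFCR16/bit-data-Science | ejercicio.py | squareUp
-- ===== SOURCE A (Python) =====
-- def squareUp(n):
--     lista_final = []
--
--     for i in range(1, n + 1):
--         contador = 0
--
--         while contador < n:
--             if contador < n - i:
--                 lista_final.append(0)
--             else:
--                 lista_final.append(n - contador)
--
--             contador += 1
--
--     return lista_final
-- ===== SOURCE B (Python) =====
-- def squareUp(n):
--     # Preallocate a flat zero buffer and write only the nonzero cells:
--     # row i's last i cells get 1..i back-to-front, via index arithmetic.
--     out = [0] * (n * max(n, 0))
--     for i in range(1, n + 1):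
--         end = i * n
--         for j in range(i):
--             out[end - 1 - j] = j + 1
--     return out
-- ===== Notes on version B (the rewrite author's own statement) =====
-- stated objective: alternative
-- what changed: B preallocates a flat n*n zero buffer and fills only the nonzero cells of each row back-to-front with in-place indexed writes, instead of A's nested per-cell append loop with a positional conditional.
import Mathlib
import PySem

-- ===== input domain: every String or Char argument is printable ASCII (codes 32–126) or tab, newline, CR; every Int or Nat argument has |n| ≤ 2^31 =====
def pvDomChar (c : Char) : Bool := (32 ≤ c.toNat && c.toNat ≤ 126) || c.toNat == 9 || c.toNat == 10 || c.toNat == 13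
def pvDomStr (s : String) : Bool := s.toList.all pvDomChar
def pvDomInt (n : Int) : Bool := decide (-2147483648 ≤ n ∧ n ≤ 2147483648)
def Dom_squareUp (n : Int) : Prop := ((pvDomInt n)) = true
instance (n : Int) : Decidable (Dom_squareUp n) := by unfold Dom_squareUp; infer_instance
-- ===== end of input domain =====

-- B preallocates a flat zero buffer of size n*n and writes only the nonzero
-- cells of each row back-to-front by index arithmetic, instead of A's
-- per-cell append loop with a positional conditional.

-- ===== PORT A =====
def squareUp (n : Int) : List Int :=
  (PySem.List.pyRange 1 (n + 1) 1).foldl (fun lista_final i =>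
    (PySem.List.pyRange 0 n 1).foldl (fun acc contador =>
      if contador < n - i then acc ++ [0] else acc ++ [n - contador]) lista_final) []

-- ===== PORT B =====
def squareUp_alt (n : Int) : List Int :=
  let out := List.replicate (n * max n 0).toNat (0 : Int)
  (PySem.List.pyRange 1 (n + 1) 1).foldl (fun out i =>
    (PySem.List.pyRange 0 i 1).foldl (fun out j =>
      PySem.List.pySetD out (i * n - 1 - j) (j + 1)) out) out

-- ===== PRECONDITION & SPEC =====
def Spec_squareUp (n : Int) (out : List Int) : Prop := out = squareUp_alt n
instance (n : Int) (out : List Int) : Decidable (Spec_squareUp n out) := by unfold Spec_squareUp; infer_instance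

-- ===== CLAIM (what is proved, stated in full; the proofs are below) =====
def Claim_equal_squareUp : Prop := ∀ (n : Int), Dom_squareUp n → Spec_squareUp n (squareUp n)

-- ===== LEMMAS AND PROOFS =====

-- the row for index i in an n-sized square: n-i zeros then i, i-1, …, 1
def pvRow (n i : Int) : List Int :=
  List.replicate (n - i).toNat 0 ++ PySem.List.pyRange i 0 (-1)

-- A's inner while-loop appends exactly pvRow n i
lemma row_eq (n i : Int) (h1 : 1 ≤ i) (h2 : i ≤ n) (acc : List Int) :
    (PySem.List.pyRange 0 n 1).foldl (fun acc contador =>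
      if contador < n - i then acc ++ [0] else acc ++ [n - contador]) acc
    = acc ++ pvRow n i := by
  have hbody := PySem.List.foldl_congr_mem (PySem.List.pyRange 0 n 1)
    (fun acc contador => if contador < n - i then acc ++ [0] else acc ++ [n - contador])
    (fun acc contador => acc ++ [if contador < n - i then (0:Int) else n - contador]) acc
    (by intro a x _; dsimp only; split <;> rfl)
  rw [hbody, PySem.List.foldl_append_singleton_eq_map]
  congr 1
  unfold pvRow
  rw [PySem.List.pyRange_neg_one]
  obtain ⟨j, hj⟩ : ∃ j : Nat, (j : Int) = n - i := ⟨(n - i).toNat, by omega⟩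
  obtain ⟨t, ht⟩ : ∃ t : Nat, (t : Int) = i := ⟨i.toNat, by omega⟩
  have hn : n = ((j + t : Nat) : Int) := by push_cast; omega
  have hnj : (n - i).toNat = j := by omega
  have hi0 : (i - 0).toNat = t := by omega
  rw [hnj, hi0, hn, PySem.List.pyRange_zero_natCast, List.range_add]
  simp only [List.map_append, List.map_map]
  congr 1
  · have : ∀ k ∈ List.range j, ((fun contador => if contador < ((j + t : Nat) : Int) - i then (0:Int) else ((j + t : Nat) : Int) - contador) ∘ (fun (k : Nat) => (k : Int))) k = 0 := by
      intro k hk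
      simp only [List.mem_range] at hk
      simp only [Function.comp]
      rw [if_pos (by push_cast; omega)]
    rw [List.map_congr_left this, List.map_const', List.length_range]
  · apply List.map_congr_left
    intro k hk
    simp only [List.mem_range] at hk
    simp only [Function.comp]
    rw [if_neg (by push_cast; omega)]
    push_cast
    omega

-- setting the last cell of a zero block
lemma set_replicate_last (k : Nat) (v : Int) :
    (List.replicate (k + 1) (0 : Int)).set k v = List.replicate k 0 ++ [v] := by
  rw [List.replicate_succ', List.set_append_right _ _ (by simp)]
  simp

-- a write inside the middle block of a three-part buffer stays in the middle block
lemma pySetD_middle (P B Q : List Int) (k v : Int) (h0 : 0 ≤ k) (h1 : k < (B.length : Int)) :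
    PySem.List.pySetD (P ++ B ++ Q) ((P.length : Int) + k) v
    = P ++ PySem.List.pySetD B k v ++ Q := by
  rw [PySem.List.pySetD_of_nonneg _ _ (by omega), PySem.List.pySetD_of_nonneg _ _ h0]
  have hk : ((P.length : Int) + k).toNat = P.length + k.toNat := by omega
  rw [hk, List.append_assoc, List.set_append_right _ _ (by omega)]
  have : P.length + k.toNat - P.length = k.toNat := by omega
  rw [this, List.set_append_left _ _ (by omega), List.append_assoc]

-- lifting a whole sequence of middle-block writes
lemma foldl_pySetD_middle (js : List Int) (f g : Int → Int) :
    ∀ (P B Q : List Int), (∀ j ∈ js, 0 ≤ f j ∧ f j < (B.length : Int)) →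
    js.foldl (fun out j => PySem.List.pySetD out ((P.length : Int) + f j) (g j)) (P ++ B ++ Q)
    = P ++ js.foldl (fun out j => PySem.List.pySetD out (f j) (g j)) B ++ Q := by
  induction js with
  | nil => intro P B Q _; rfl
  | cons j js ih =>
    intro P B Q h
    have hj := h j (by simp)
    simp only [List.foldl_cons]
    rw [pySetD_middle P B Q (f j) (g j) hj.1 hj.2]
    apply ih
    intro x hx
    have := h x (by simp [hx])
    rwa [PySem.List.length_pySetD]

-- filling the last t cells of a zero row back-to-front yields the row's descending run
lemma inner_fill (N : Nat) : ∀ t : Nat, t ≤ N →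
    (PySem.List.pyRange 0 (t : Int) 1).foldl
      (fun out j => PySem.List.pySetD out ((N : Int) - 1 - j) (j + 1))
      (List.replicate N (0 : Int))
    = List.replicate (N - t) 0 ++ PySem.List.pyRange (t : Int) 0 (-1) := by
  intro t
  induction t with
  | zero =>
    intro _
    rw [PySem.List.pyRange_one_eq_nil (by omega), PySem.List.pyRange_neg_one_eq_nil (by omega)]
    simp
  | succ t ih =>
    intro ht
    have hcast : ((t + 1 : Nat) : Int) = (t : Int) + 1 := by push_cast; ring
    rw [hcast, PySem.List.pyRange_one_succ_right (by omega), List.foldl_append, ih (by omega)]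
    simp only [List.foldl_cons, List.foldl_nil]
    rw [PySem.List.pySetD_of_nonneg _ _ (by omega)]
    have hidx : ((N : Int) - 1 - (t : Int)).toNat = N - t - 1 := by omega
    rw [hidx, List.set_append_left _ _ (by simp; omega)]
    have hrep : List.replicate (N - t) (0 : Int) = List.replicate ((N - t - 1) + 1) 0 := by
      congr 1; omega
    have h1 : N - (t + 1) = N - t - 1 := by omega
    rw [hrep, set_replicate_last, h1]
    have hd : PySem.List.pyRange ((t : Int) + 1) 0 (-1)
        = ((t : Int) + 1) :: PySem.List.pyRange ((t : Int)) 0 (-1) := by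
      rw [PySem.List.pyRange_neg_one_cons (by omega)]
      norm_num
    rw [hd, List.append_assoc]
    rfl

-- length of A's flattened prefix
lemma length_flat (N m : Nat) (hm : m ≤ N) :
    ((PySem.List.pyRange 1 ((m : Int) + 1) 1).flatMap (pvRow (N : Int))).length = m * N := by
  rw [List.length_flatMap]
  have : ∀ i ∈ PySem.List.pyRange 1 ((m : Int) + 1) 1, (pvRow (N : Int) i).length = N := by
    intro i hi
    rw [PySem.List.mem_pyRange_one] at hi
    unfold pvRow
    rw [List.length_append, List.length_replicate, PySem.List.length_pyRange_neg_one]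
    omega
  rw [List.map_congr_left this, List.map_const', List.sum_replicate, smul_eq_mul,
      PySem.List.length_pyRange_one]
  have : ((m : Int) + 1 - 1).toNat = m := by omega
  rw [this]

-- the outer loop invariant: after rows 1..m the buffer is the flattened prefix plus zeros
lemma outer_fill (N : Nat) : ∀ m : Nat, m ≤ N →
    (PySem.List.pyRange 1 ((m : Int) + 1) 1).foldl
      (fun out i =>
        (PySem.List.pyRange 0 i 1).foldl (fun out j =>
          PySem.List.pySetD out (i * (N : Int) - 1 - j) (j + 1)) out)
      (List.replicate (N * N) (0 : Int))
    = (PySem.List.pyRange 1 ((m : Int) + 1) 1).flatMap (pvRow (N : Int))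
      ++ List.replicate ((N - m) * N) 0 := by
  intro m
  induction m with
  | zero =>
    intro _
    rw [PySem.List.pyRange_one_eq_nil (by omega)]
    simp
  | succ m ih =>
    intro hm
    have hcast : ((m + 1 : Nat) : Int) + 1 = ((m : Int) + 1) + 1 := by push_cast; ring
    rw [hcast, PySem.List.pyRange_one_succ_right (by omega), List.foldl_append, ih (by omega),
        List.foldl_cons, List.foldl_nil, List.flatMap_append]
    set F := (PySem.List.pyRange 1 ((m : Int) + 1) 1).flatMap (pvRow (N : Int)) with hF
    have hFlen : F.length = m * N := length_flat N m (by omega)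
    have hsplit : List.replicate ((N - m) * N) (0 : Int)
        = List.replicate N 0 ++ List.replicate ((N - (m + 1)) * N) 0 := by
      rw [← List.replicate_add]
      congr 1
      have : N - m = (N - (m + 1)) + 1 := by omega
      rw [this, Nat.succ_mul]
      omega
    rw [hsplit, ← List.append_assoc]
    have hfun : (PySem.List.pyRange 0 ((m : Int) + 1) 1).foldl
        (fun out j => PySem.List.pySetD out (((m : Int) + 1) * (N : Int) - 1 - j) (j + 1))
        (F ++ List.replicate N 0 ++ List.replicate ((N - (m + 1)) * N) 0)
        = (PySem.List.pyRange 0 ((m : Int) + 1) 1).foldl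
        (fun out j => PySem.List.pySetD out ((F.length : Int) + ((N : Int) - 1 - j)) (j + 1))
        (F ++ List.replicate N 0 ++ List.replicate ((N - (m + 1)) * N) 0) := by
      apply PySem.List.foldl_congr_mem
      intro acc j hj
      rw [PySem.List.mem_pyRange_one] at hj
      have : ((m : Int) + 1) * (N : Int) - 1 - j = (F.length : Int) + ((N : Int) - 1 - j) := by
        rw [hFlen]; push_cast; ring
      rw [this]
    rw [hfun, foldl_pySetD_middle _ _ _ F (List.replicate N 0) _ (by
      intro j hj
      rw [PySem.List.mem_pyRange_one] at hj
      rw [List.length_replicate]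
      omega)]
    have hin : (PySem.List.pyRange 0 ((m : Int) + 1) 1).foldl
        (fun out j => PySem.List.pySetD out ((N : Int) - 1 - j) (j + 1))
        (List.replicate N (0 : Int))
        = List.replicate (N - (m + 1)) 0 ++ PySem.List.pyRange ((m : Int) + 1) 0 (-1) := by
      have := inner_fill N (m + 1) hm
      have hc : ((m + 1 : Nat) : Int) = (m : Int) + 1 := by push_cast; ring
      rwa [hc] at this
    rw [hin]
    have hrow : List.replicate (N - (m + 1)) (0 : Int) ++ PySem.List.pyRange ((m : Int) + 1) 0 (-1)
        = pvRow (N : Int) ((m : Int) + 1) := by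
      unfold pvRow
      congr 2
      omega
    rw [hrow]
    simp [List.append_assoc]

-- ===== VERDICT (by name: the statement is the Claim_ definition above) =====
theorem squareUp_spec : Claim_equal_squareUp := by
  intro n _
  show squareUp n = squareUp_alt n
  unfold squareUp squareUp_alt
  by_cases hn : n ≤ 0
  · rw [PySem.List.pyRange_one_eq_nil (a := 1) (b := n + 1) (by omega)]
    simp only [List.foldl_nil]
    have : (n * max n 0).toNat = 0 := by
      rw [max_eq_right hn]
      simp
    rw [this]
    rfl
  · obtain ⟨N, hN⟩ : ∃ N : Nat, (N : Int) = n := ⟨n.toNat, by omega⟩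
    have hA : (PySem.List.pyRange 1 (n + 1) 1).foldl (fun lista_final i =>
        (PySem.List.pyRange 0 n 1).foldl (fun acc contador =>
          if contador < n - i then acc ++ [0] else acc ++ [n - contador]) lista_final) []
        = (PySem.List.pyRange 1 (n + 1) 1).foldl (fun acc i => acc ++ pvRow n i) [] := by
      apply PySem.List.foldl_congr_mem
      intro acc i hi
      rw [PySem.List.mem_pyRange_one] at hi
      exact row_eq n i hi.1 (by omega) acc
    have hmax : n * max n 0 = n * n := by rw [max_eq_left (by omega)]
    have htoNat : (n * n).toNat = N * N := by rw [← hN, ← Nat.cast_mul, Int.toNat_natCast]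
    rw [hA, PySem.List.foldl_append_eq_flatMap, List.nil_append]
    show _ = (PySem.List.pyRange 1 (n + 1) 1).foldl _ (List.replicate (n * max n 0).toNat 0)
    rw [hmax, htoNat, ← hN]
    have := outer_fill N N (le_refl N)
    rw [this]
    simp
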